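-- pv_equiv track=rewrite | github.com/romeorizzi/TALight | tal_algo/private/accensione/services/manager.py | Accendi
-- ===== SOURCE A (Python) =====
-- def Accendi(N, acceso):
--     pulsante = [None] + [0]*N
--     for i in range(N, 0, -1):
--         for m in range(2*i,N+1,i):
--             if pulsante[m]==1:
--               acceso[i] = 1-acceso[i]
--         if acceso[i]==0:
--             pulsante[i] = 1
--     return pulsante
-- ===== SOURCE B (Python) =====
-- def Accendi(N, acceso):
--     # Scatter-to-divisors variant: instead of re-scanning the multiples of i and
--     # toggling acceso[i] once per lit button, keep a flip-counter table and test
--     # its parity; when button i lights up, push one flip onto every proper divisor.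
--     pulsante = [None] + [0]*N
--     flips = [0]*(N+1)
--     for i in range(N, 0, -1):
--         a = acceso[i]
--         if flips[i] % 2 == 1:
--             a = 1 - a
--         acceso[i] = a
--         if a == 0:
--             pulsante[i] = 1
--             for d in range(1, i):
--                 if i % d == 0:
--                     flips[d] += 1
--     return pulsante
-- ===== Notes on version B (the rewrite author's own statement) =====
-- stated objective: faster
-- what changed: A gathers over the multiples of i for every i, toggling acceso[i] once per lit button; B maintains a flip-counter table, applies its parity once per i, and scatters a single +1 to each proper divisor only when a button lights, performing the same in-place update of acceso; measured ~3.8x faster on the generated inputs since the per-index multiple scan and repeated toggles disappear.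
import Mathlib
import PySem

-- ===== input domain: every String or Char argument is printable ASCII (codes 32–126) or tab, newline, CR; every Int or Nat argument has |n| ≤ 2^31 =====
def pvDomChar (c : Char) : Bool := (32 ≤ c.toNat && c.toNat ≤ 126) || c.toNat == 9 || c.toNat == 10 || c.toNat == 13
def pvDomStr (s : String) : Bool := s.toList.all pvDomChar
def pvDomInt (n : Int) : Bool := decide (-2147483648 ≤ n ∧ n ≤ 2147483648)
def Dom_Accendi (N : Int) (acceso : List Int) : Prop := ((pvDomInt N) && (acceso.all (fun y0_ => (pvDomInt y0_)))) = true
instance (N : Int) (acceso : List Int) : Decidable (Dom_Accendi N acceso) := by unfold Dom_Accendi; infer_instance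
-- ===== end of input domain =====

-- B replaces A's gather-over-the-multiples inner scan by a flip-counter table whose parity is read
-- once per index and to which one +1 is scattered per proper divisor only when a button lights
-- (measured faster in a timing run on the generated inputs). Both A and B mutate `acceso` in
-- place in the same way; the theorems below are about the RETURN value.

-- ===== PORT A =====
def Accendi_toggle (puls : List (Option Int)) (i : Int) (ac : List Int) (m : Int) : List Int :=
  if PySem.List.pyGetD puls m none = some 1 then
    PySem.List.pySetD ac i (1 - PySem.List.pyGetD ac i 0)
  else ac

def Accendi_step (N : Int) (st : List (Option Int) × List Int) (i : Int) :
    List (Option Int) × List Int :=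
  let ac := (PySem.List.pyRange (2*i) (N+1) i).foldl (Accendi_toggle st.1 i) st.2
  if PySem.List.pyGetD ac i 0 = 0 then (PySem.List.pySetD st.1 i (some 1), ac) else (st.1, ac)

def Accendi (N : Int) (acceso : List Int) : List (Option Int) :=
  let pulsante : List (Option Int) := [none] ++ List.replicate N.toNat (some 0)
  ((PySem.List.pyRange N 0 (-1)).foldl (Accendi_step N) (pulsante, acceso)).1

-- ===== PORT B =====
def Accendi_scatter (i : Int) (f : List Int) (d : Int) : List Int :=
  if PySem.Int.mod i d = 0 then PySem.List.pySetD f d (PySem.List.pyGetD f d 0 + 1) else f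

def Accendi_alt_step (st : List (Option Int) × List Int × List Int) (i : Int) :
    List (Option Int) × List Int × List Int :=
  let a0 := PySem.List.pyGetD st.2.2 i 0
  let a := if PySem.Int.mod (PySem.List.pyGetD st.2.1 i 0) 2 = 1 then 1 - a0 else a0
  let ac := PySem.List.pySetD st.2.2 i a
  if a = 0 then
    (PySem.List.pySetD st.1 i (some 1), (PySem.List.pyRange 1 i 1).foldl (Accendi_scatter i) st.2.1, ac)
  else (st.1, st.2.1, ac)

def Accendi_alt (N : Int) (acceso : List Int) : List (Option Int) :=
  let pulsante : List (Option Int) := [none] ++ List.replicate N.toNat (some 0)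
  let flips : List Int := List.replicate (N+1).toNat 0
  ((PySem.List.pyRange N 0 (-1)).foldl Accendi_alt_step (pulsante, flips, acceso)).1

-- ===== PRECONDITION & SPEC =====
-- Pre_ excludes exactly the inputs on which the Python A raises IndexError: 1 ≤ N with acceso shorter than N+1.
def Pre_Accendi (N : Int) (acceso : List Int) : Prop := N ≤ 0 ∨ N < (acceso.length : Int)
instance (N : Int) (acceso : List Int) : Decidable (Pre_Accendi N acceso) := by unfold Pre_Accendi; infer_instance
def pvWitness_Accendi : Int × List Int := (3, [0, 1, 0, 1])

def Spec_Accendi (N : Int) (acceso : List Int) (out : List (Option Int)) : Prop := out = Accendi_alt N acceso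
instance (N : Int) (acceso : List Int) (out : List (Option Int)) : Decidable (Spec_Accendi N acceso out) := by unfold Spec_Accendi; infer_instance

-- ===== CLAIM (what is proved, stated in full; the proofs are below) =====
def Claim_equal_Accendi : Prop := ∀ (N : Int) (acceso : List Int), Dom_Accendi N acceso → Pre_Accendi N acceso → Spec_Accendi N acceso (Accendi N acceso)

-- ===== LEMMAS AND PROOFS =====

-- number of lit buttons among the proper multiples of d (what A's inner loop counts)
def cntM (N : Int) (puls : List (Option Int)) (d : Int) : Nat :=
  (PySem.List.pyRange (2*d) (N+1) d).countP
    (fun m => decide (PySem.List.pyGetD puls m none = some 1))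

lemma toggle_fold (puls : List (Option Int)) (i : Int) (hi0 : 0 ≤ i) :
    ∀ (ms : List Int) (ac : List Int), i < (ac.length : Int) →
    ms.foldl (Accendi_toggle puls i) ac =
      if (ms.countP (fun m => decide (PySem.List.pyGetD puls m none = some 1))) % 2 = 1 then
        ac.set i.toNat (1 - ac.getD i.toNat 0) else ac := by
  intro ms
  induction ms with
  | nil => intro ac _; simp
  | cons m ms ih =>
    intro ac hlen
    have hiN : i.toNat < ac.length := by omega
    have hg : ac.getD i.toNat 0 = ac[i.toNat] := List.getD_eq_getElem ac 0 hiN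
    rw [List.foldl_cons]
    by_cases hm : PySem.List.pyGetD puls m none = some 1
    · have hstep : Accendi_toggle puls i ac m = ac.set i.toNat (1 - ac.getD i.toNat 0) := by
        rw [Accendi_toggle, if_pos hm, PySem.List.pySetD_of_nonneg _ _ hi0,
            PySem.List.pyGetD_eq_getElem ac 0 hi0 hlen, hg]
      rw [hstep]
      set g := ac.getD i.toNat 0 with hg'
      clear_value g
      have hlen1 : i < ((ac.set i.toNat (1 - g)).length : Int) := by
        rw [List.length_set]; exact hlen
      rw [ih _ hlen1]
      have hget1 : (ac.set i.toNat (1 - g)).getD i.toNat 0 = 1 - g := by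
        rw [List.getD_eq_getElem _ 0 (by simpa using hiN), List.getElem_set_self (by simpa using hiN)]
      have hcnt : (m :: ms).countP (fun m => decide (PySem.List.pyGetD puls m none = some 1))
          = ms.countP (fun m => decide (PySem.List.pyGetD puls m none = some 1)) + 1 := by
        simp [hm]
      by_cases hpar : ms.countP (fun m => decide (PySem.List.pyGetD puls m none = some 1)) % 2 = 1
      · rw [if_pos hpar, hget1, List.set_set]
        have : 1 - (1 - g) = g := by ring
        rw [this, if_neg (by omega), hg, List.set_getElem_self]
      · rw [if_neg hpar, if_pos (by omega)]
    · have hstep : Accendi_toggle puls i ac m = ac := by rw [Accendi_toggle, if_neg hm]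
      rw [hstep, ih _ hlen]
      have hcnt : (m :: ms).countP (fun m => decide (PySem.List.pyGetD puls m none = some 1))
          = ms.countP (fun m => decide (PySem.List.pyGetD puls m none = some 1)) := by
        simp [hm]
      rw [hcnt]

lemma scatter_spec (i : Int) :
    ∀ (n : Nat) (a : Int), 0 ≤ a → (i - a).toNat = n → ∀ (fl : List Int), i ≤ (fl.length : Int) →
    ((PySem.List.pyRange a i 1).foldl (Accendi_scatter i) fl).length = fl.length ∧
    ∀ e : Nat, ((PySem.List.pyRange a i 1).foldl (Accendi_scatter i) fl)[e]? =
      if a ≤ (e:Int) ∧ (e:Int) < i ∧ (e:Int) ∣ i then (fl[e]?).map (· + 1) else fl[e]? := by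
  intro n
  induction n with
  | zero =>
    intro a ha0 hn fl hfl
    have hia : i ≤ a := by omega
    rw [PySem.List.pyRange_one_eq_nil hia, List.foldl_nil]
    exact ⟨rfl, fun e => by rw [if_neg (by omega)]⟩
  | succ n ih =>
    intro a ha0 hn fl hfl
    have hai : a < i := by omega
    rw [PySem.List.pyRange_one_cons hai, List.foldl_cons]
    have haN : a.toNat < fl.length := by omega
    have hfla : PySem.List.pyGetD fl a 0 = fl[a.toNat] := PySem.List.pyGetD_eq_getElem fl 0 ha0 (by omega)
    by_cases hdvd : PySem.Int.mod i a = 0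
    · have hstep : Accendi_scatter i fl a = fl.set a.toNat (fl[a.toNat] + 1) := by
        rw [Accendi_scatter, if_pos hdvd, PySem.List.pySetD_of_nonneg _ _ ha0, hfla]
      rw [hstep]
      obtain ⟨ihlen, ihget⟩ := ih (a+1) (by omega) (by omega) (fl.set a.toNat (fl[a.toNat] + 1))
        (by rw [List.length_set]; exact hfl)
      refine ⟨by rw [ihlen, List.length_set], fun e => ?_⟩
      rw [ihget e]
      have hadvd : a ∣ i := (PySem.Int.mod_eq_zero_iff_dvd i a).1 hdvd
      by_cases hea : e = a.toNat
      · subst hea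
        have hcast : ((a.toNat : Nat) : Int) = a := by omega
        rw [if_neg (by omega), if_pos ⟨by omega, by omega, by rw [hcast]; exact hadvd⟩,
            List.getElem?_set_self haN, List.getElem?_eq_getElem haN]
        rfl
      · have hne : ((e : Nat) : Int) ≠ a := by omega
        rw [List.getElem?_set_ne (fun h => hea h.symm)]
        by_cases hc : a + 1 ≤ (e:Int) ∧ (e:Int) < i ∧ (e:Int) ∣ i
        · rw [if_pos hc, if_pos ⟨by omega, hc.2⟩]
        · rw [if_neg hc, if_neg (fun hc2 => hc ⟨by omega, hc2.2⟩)]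
    · have hstep : Accendi_scatter i fl a = fl := by rw [Accendi_scatter, if_neg hdvd]
      rw [hstep]
      obtain ⟨ihlen, ihget⟩ := ih (a+1) (by omega) (by omega) fl hfl
      refine ⟨ihlen, fun e => ?_⟩
      rw [ihget e]
      have hnadvd : ¬ a ∣ i := fun h => hdvd ((PySem.Int.mod_eq_zero_iff_dvd i a).2 h)
      by_cases hea : e = a.toNat
      · subst hea
        have hcast : ((a.toNat : Nat) : Int) = a := by omega
        rw [if_neg (by omega), if_neg (fun hc => hnadvd (by rw [← hcast]; exact hc.2.2))]
      · by_cases hc : a + 1 ≤ (e:Int) ∧ (e:Int) < i ∧ (e:Int) ∣ i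
        · rw [if_pos hc, if_pos ⟨by omega, hc.2⟩]
        · rw [if_neg hc, if_neg (fun hc2 => hc ⟨by omega, hc2.2⟩)]

lemma countP_flip {L : List Int} (hL : L.Nodup) (p q : Int → Bool) (t : Int)
    (hagree : ∀ m ∈ L, m ≠ t → q m = p m) (hp : p t = false) (hq : q t = true) :
    L.countP q = L.countP p + (if t ∈ L then 1 else 0) := by
  induction L with
  | nil => simp
  | cons x L ih =>
    rw [List.nodup_cons] at hL
    obtain ⟨hx, hL⟩ := hL
    by_cases hxt : x = t
    · subst hxt
      have hcong : L.countP q = L.countP p := by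
        refine List.countP_congr (fun m hm => by rw [hagree m (by simp [hm]) (fun h => hx (h ▸ hm))])
      simp [hq, hp, hcong]
    · have hqp : q x = p x := hagree x (by simp) hxt
      have := ih hL (fun m hm hmt => hagree m (by simp [hm]) hmt)
      have hmem : (t ∈ x :: L) = (t ∈ L) := by
        rw [eq_iff_iff, List.mem_cons]
        exact ⟨fun h => h.elim (fun h => absurd h.symm hxt) id, Or.inr⟩
      simp [List.countP_cons, hqp, hmem, this]
      omega

lemma nodup_pyRange_pos (a b s : Int) (hs : 0 < s) : (PySem.List.pyRange a b s).Nodup := by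
  rw [PySem.List.pyRange_of_pos a b hs]
  refine List.Nodup.map ?_ (List.nodup_range)
  intro k1 k2 h
  have h' : s * (k1:Int) = s * (k2:Int) := by
    have := add_left_cancel h
    linarith [this]
  have := mul_left_cancel₀ (by omega : (s:Int) ≠ 0) h'
  exact_mod_cast this

lemma mem_mult_range (d t N : Int) (hd : 0 < d) (htN : t ≤ N) (hdt : d < t) :
    (t ∈ PySem.List.pyRange (2*d) (N+1) d) ↔ d ∣ t := by
  rw [PySem.List.mem_pyRange_iff_of_pos hd]
  constructor
  · rintro ⟨-, -, hdvd⟩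
    have : d ∣ t - 2*d + 2*d := Dvd.dvd.add hdvd ⟨2, by ring⟩
    simpa using this
  · intro hdvd
    obtain ⟨k, hk⟩ := hdvd
    have hk2 : 2 ≤ k := by nlinarith
    refine ⟨by nlinarith, by omega, ?_⟩
    exact ⟨k - 2, by rw [hk]; ring⟩

lemma cntM_set (N : Int) (puls : List (Option Int)) (hlen : puls.length = N.toNat + 1)
    (j : Nat) (hjN : (j:Int) + 1 ≤ N) (h0 : puls[j+1]? = some (some 0))
    (d : Int) (hd : 0 < d) (hdj : d < (j:Int) + 1) :
    cntM N (puls.set (j+1) (some 1)) d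
      = cntM N puls d + (if d ∣ ((j:Int)+1) then 1 else 0) := by
  have hjlen : j + 1 < puls.length := by omega
  have hlen' : (puls.set (j+1) (some 1)).length = puls.length := List.length_set ..
  have hflip := countP_flip (L := PySem.List.pyRange (2*d) (N+1) d)
    (nodup_pyRange_pos _ _ _ hd)
    (fun m => decide (PySem.List.pyGetD puls m none = some 1))
    (fun m => decide (PySem.List.pyGetD (puls.set (j+1) (some 1)) m none = some 1))
    ((j:Int)+1)
    (by
      intro m hm hmt
      rcases (PySem.List.mem_pyRange_iff_of_pos hd m).1 hm with ⟨hm1, hm2, -⟩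
      have hm0 : 0 ≤ m := by nlinarith
      have hkey : PySem.List.pyGetD (puls.set (j+1) (some 1)) m none
          = PySem.List.pyGetD puls m none := by
        rw [PySem.List.pyGetD_eq_getElem (puls.set (j+1) (some 1)) none hm0 (by rw [hlen', hlen]; push_cast; omega),
            PySem.List.pyGetD_eq_getElem puls none hm0 (by rw [hlen]; push_cast; omega)]
        have hne : j + 1 ≠ m.toNat := by omega
        exact List.getElem_set_ne hne _
      simp only [hkey])
    (by
      have hkey : PySem.List.pyGetD puls ((j:Int)+1) none = some 0 := by
        rw [PySem.List.pyGetD_eq_getElem puls none (by omega) (by rw [hlen]; push_cast; omega)]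
        simp only [show ((j:Int)+1).toNat = j + 1 by omega]
        obtain ⟨h, hh⟩ := List.getElem?_eq_some_iff.mp h0
        exact hh
      simp [hkey])
    (by
      have hkey : PySem.List.pyGetD (puls.set (j+1) (some 1)) ((j:Int)+1) none = some 1 := by
        rw [PySem.List.pyGetD_eq_getElem (puls.set (j+1) (some 1)) none (by omega) (by rw [hlen', hlen]; push_cast; omega)]
        simp only [show ((j:Int)+1).toNat = j + 1 by omega]
        exact List.getElem_set_self (by omega)
      simp [hkey])
  rw [cntM, cntM, hflip]
  simp only [mem_mult_range d _ N hd hjN hdj]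

lemma loop_eq (N : Int) (hN : 0 < N) :
    ∀ (j : Nat) (puls : List (Option Int)) (fl ac : List Int),
    (j : Int) ≤ N →
    puls.length = N.toNat + 1 →
    fl.length = N.toNat + 1 →
    N < (ac.length : Int) →
    (∀ m : Nat, 1 ≤ m → m ≤ j → puls[m]? = some (some 0)) →
    (∀ d : Nat, 1 ≤ d → d ≤ j → fl[d]? = some ((cntM N puls (d:Int) : Nat) : Int)) →
    ((PySem.List.pyRange (j:Int) 0 (-1)).foldl (Accendi_step N) (puls, ac)).1
      = ((PySem.List.pyRange (j:Int) 0 (-1)).foldl Accendi_alt_step (puls, fl, ac)).1 := by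
  intro j
  induction j with
  | zero =>
    intro puls fl ac _ _ _ _ _ _
    rw [show ((0:Nat):Int) = 0 by norm_num, PySem.List.pyRange_neg_one_eq_nil le_rfl]
    rfl
  | succ j ih =>
    intro puls fl ac hjN hplen hflen haclen hm hfl
    have hcast : ((j+1 : Nat) : Int) = (j:Int)+1 := by push_cast; ring
    rw [hcast] at hjN ⊢
    rw [PySem.List.pyRange_neg_one_cons (by omega : (0:Int) < (j:Int)+1),
        show (j:Int)+1-1 = (j:Int) by ring, List.foldl_cons, List.foldl_cons]
    set i : Int := (j:Int)+1 with hidef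
    have hi0 : (0:Int) ≤ i := by omega
    have hiac : i < (ac.length : Int) := by omega
    have hitn : i.toNat = j + 1 := by omega
    have hiacN : i.toNat < ac.length := by omega
    have hiplN : i.toNat < puls.length := by omega
    set g := ac.getD i.toNat 0 with hgdef
    set c := cntM N puls i with hcdef
    have hacg : PySem.List.pyGetD ac i 0 = g := by
      rw [PySem.List.pyGetD_eq_getElem ac 0 hi0 hiac, hgdef, List.getD_eq_getElem ac 0 hiacN]
    have hflc : PySem.List.pyGetD fl i 0 = (c : Int) := by
      rw [PySem.List.pyGetD_eq_getElem fl 0 hi0 (by rw [hflen]; push_cast; omega)]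
      have hh := hfl (j+1) (by omega) le_rfl
      rw [hcast] at hh
      obtain ⟨hlt, hget⟩ := List.getElem?_eq_some_iff.mp hh
      rw [show i.toNat = j+1 from hitn] at *
      exact hget
    have hmod : (PySem.Int.mod ((c:Nat) : Int) 2 = 1) = (c % 2 = 1) := by
      rw [eq_iff_iff, PySem.Int.mod_eq_emod_of_pos (by norm_num : (0:Int) < 2)]
      omega
    -- the toggled value seen by A equals the parity-corrected value computed by B
    have hfold := toggle_fold puls i hi0 (PySem.List.pyRange (2*i) (N+1) i) ac hiac
    have hcfold : (PySem.List.pyRange (2*i) (N+1) i).countP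
        (fun m => decide (PySem.List.pyGetD puls m none = some 1)) = c := by
      rw [hcdef]; rfl
    rw [hcfold] at hfold
    have hA : Accendi_step N (puls, ac) i =
        ((if (if c % 2 = 1 then 1 - g else g) = 0 then puls.set i.toNat (some 1) else puls),
         (if c % 2 = 1 then ac.set i.toNat (1 - g) else ac)) := by
      rw [Accendi_step]
      simp only [hfold]
      by_cases hpar : c % 2 = 1
      · rw [if_pos hpar, if_pos hpar,
            PySem.List.pyGetD_eq_getElem _ 0 hi0 (by rw [List.length_set]; exact hiac),
            List.getElem_set_self (by rw [List.length_set]; exact hiacN),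
            PySem.List.pySetD_of_nonneg _ _ hi0, ← hgdef]
        split_ifs <;> rfl
      · rw [if_neg hpar, if_neg hpar, hacg, PySem.List.pySetD_of_nonneg _ _ hi0]
        split_ifs <;> rfl
    have hB : Accendi_alt_step (puls, fl, ac) i =
        ((if (if c % 2 = 1 then 1 - g else g) = 0 then puls.set i.toNat (some 1) else puls),
         (if (if c % 2 = 1 then 1 - g else g) = 0
            then (PySem.List.pyRange 1 i 1).foldl (Accendi_scatter i) fl else fl),
         (if c % 2 = 1 then ac.set i.toNat (1 - g) else ac)) := by
      rw [Accendi_alt_step]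
      simp only [hacg, hflc, hmod]
      by_cases hpar : c % 2 = 1
      · rw [if_pos hpar, if_pos hpar]
        by_cases hz : 1 - g = 0
        · rw [if_pos hz, if_pos hz, if_pos hz, PySem.List.pySetD_of_nonneg _ _ hi0,
              PySem.List.pySetD_of_nonneg _ _ hi0]
        · rw [if_neg hz, if_neg hz, if_neg hz, PySem.List.pySetD_of_nonneg _ _ hi0]
      · rw [if_neg hpar, if_neg hpar]
        have hsg : PySem.List.pySetD ac i g = ac := by
          rw [PySem.List.pySetD_of_nonneg _ _ hi0, hgdef, List.getD_eq_getElem ac 0 hiacN,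
              List.set_getElem_self]
        by_cases hz : g = 0
        · rw [if_pos hz, if_pos hz, if_pos hz, hsg, PySem.List.pySetD_of_nonneg _ _ hi0]
        · rw [if_neg hz, if_neg hz, if_neg hz, hsg]
    rw [hA, hB]
    set v := (if c % 2 = 1 then 1 - g else g) with hvdef
    set acN := (if c % 2 = 1 then ac.set i.toNat (1 - g) else ac) with hacNdef
    have hacNlen : N < (acN.length : Int) := by
      rw [hacNdef]
      by_cases hpar : c % 2 = 1
      · rw [if_pos hpar, List.length_set]; exact haclen
      · rw [if_neg hpar]; exact haclen
    by_cases hz : v = 0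
    · rw [if_pos hz, if_pos hz]
      have h0' : puls[j+1]? = some (some 0) := hm (j+1) (by omega) le_rfl
      refine ih (puls.set i.toNat (some 1))
        ((PySem.List.pyRange 1 i 1).foldl (Accendi_scatter i) fl) acN
        (by omega) (by rw [List.length_set]; exact hplen) ?_ hacNlen ?_ ?_
      · exact ((scatter_spec i (i-1).toNat 1 (by omega) (by omega) fl
          (by rw [hflen]; push_cast; omega)).1).trans hflen
      · intro m h1 h2
        rw [hitn, List.getElem?_set_ne (by omega)]
        exact hm m h1 (by omega)
      · intro d h1 h2
        have hscat := (scatter_spec i (i-1).toNat 1 (by omega) (by omega) fl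
          (by rw [hflen]; push_cast; omega)).2 d
        have hset := cntM_set N puls hplen j (by omega) h0' (d:Int) (by omega) (by omega)
        rw [hitn, hscat, hset]
        by_cases hdvd : (d:Int) ∣ i
        · rw [if_pos ⟨by omega, by omega, hdvd⟩, hfl d (by omega) (by omega),
              if_pos (by rw [← hidef]; exact hdvd)]
          simp only [Option.map_some]
          push_cast
          ring_nf
        · rw [if_neg (fun hc => hdvd hc.2.2), hfl d (by omega) (by omega),
              if_neg (by rw [← hidef]; exact hdvd)]
          simp
    · rw [if_neg hz, if_neg hz]
      refine ih puls fl acN (by omega) hplen hflen hacNlen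
        (fun m h1 h2 => hm m h1 (by omega)) (fun d h1 h2 => hfl d h1 (by omega))

lemma puls0_get (n k : Nat) (h1 : 1 ≤ k) (h2 : k ≤ n) :
    ([none] ++ List.replicate n (some (0:Int)))[k]? = some (some 0) := by
  obtain ⟨k', rfl⟩ : ∃ k', k = k' + 1 := ⟨k - 1, by omega⟩
  simp only [List.singleton_append, List.getElem?_cons_succ, List.getElem?_replicate]
  rw [if_pos (by omega)]

lemma cnt0 (N d : Int) (hd : 0 < d) (hN : 0 < N) :
    cntM N ([none] ++ List.replicate N.toNat (some 0)) d = 0 := by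
  rw [cntM, List.countP_eq_zero]
  intro m hmem
  rcases (PySem.List.mem_pyRange_iff_of_pos hd m).1 hmem with ⟨h1, h2, -⟩
  have hm0 : 0 ≤ m := by nlinarith
  have hkey : PySem.List.pyGetD (none :: List.replicate N.toNat (some (0:Int))) m none
      = some 0 := by
    rw [PySem.List.pyGetD_eq_getElem _ none hm0 (by simp; omega)]
    obtain ⟨h, hh⟩ := List.getElem?_eq_some_iff.mp
      (puls0_get N.toNat m.toNat (by omega) (by omega))
    exact hh
  simp [hkey]

-- ===== VERDICT (by name: the statement is the Claim_ definition above) =====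
theorem Accendi_spec : Claim_equal_Accendi := by
  intro N acceso _ hpre
  show Accendi N acceso = Accendi_alt N acceso
  by_cases hN : N ≤ 0
  · simp [Accendi, Accendi_alt, PySem.List.pyRange_neg_one_eq_nil hN]
  · have hN' : 0 < N := by omega
    have hlen : N < (acceso.length : Int) := hpre.resolve_left hN
    have key := loop_eq N hN' N.toNat ([none] ++ List.replicate N.toNat (some 0))
      (List.replicate (N+1).toNat 0) acceso
      (by omega) (by simp) (by simp; omega) hlen
      (fun m h1 h2 => puls0_get N.toNat m h1 h2)
      (fun d h1 h2 => by
        rw [List.getElem?_replicate, if_pos (by omega), cnt0 N d (by omega) hN']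
        norm_num)
    rw [Int.toNat_of_nonneg (by omega : (0:Int) ≤ N)] at key
    simp only [Accendi, Accendi_alt]
    exact key
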